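-- pv_equiv track=rewrite | github.com/ranwez/CDScompare | script/pre_comparison.py | ref_alt_is_sorted
-- ===== SOURCE A (Python) =====
-- def ref_alt_is_sorted(dict_ref, dict_alt, verbose=False):
--     is_sorted = True
--     ref_list = list(dict_ref.items())
--     alt_list = list(dict_alt.items())
--
--     for i in range(len(ref_list)-1):
--         if ref_list[i] > ref_list[i+1]:
--             is_sorted = False
--
--     for j in range(len(alt_list)-1):
--         if alt_list[j] > alt_list[j+1]:
--             is_sorted = False
--
--     return is_sorted
-- ===== SOURCE B (Python) =====
-- def ref_alt_is_sorted(dict_ref, dict_alt, verbose=False):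
--     ref_list = list(dict_ref.items())
--     alt_list = list(dict_alt.items())
--     ref_ok = ref_list == sorted(ref_list)
--     alt_ok = alt_list == sorted(alt_list)
--     return ref_ok and alt_ok
-- ===== Notes on version B (the rewrite author's own statement) =====
-- stated objective: idiomatic
-- what changed: Replaces the two index-based adjacent-pair scans with a flag by comparing each items list to its sorted copy; both comparisons are computed before combining, preserving A's evaluation order.
import Mathlib
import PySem

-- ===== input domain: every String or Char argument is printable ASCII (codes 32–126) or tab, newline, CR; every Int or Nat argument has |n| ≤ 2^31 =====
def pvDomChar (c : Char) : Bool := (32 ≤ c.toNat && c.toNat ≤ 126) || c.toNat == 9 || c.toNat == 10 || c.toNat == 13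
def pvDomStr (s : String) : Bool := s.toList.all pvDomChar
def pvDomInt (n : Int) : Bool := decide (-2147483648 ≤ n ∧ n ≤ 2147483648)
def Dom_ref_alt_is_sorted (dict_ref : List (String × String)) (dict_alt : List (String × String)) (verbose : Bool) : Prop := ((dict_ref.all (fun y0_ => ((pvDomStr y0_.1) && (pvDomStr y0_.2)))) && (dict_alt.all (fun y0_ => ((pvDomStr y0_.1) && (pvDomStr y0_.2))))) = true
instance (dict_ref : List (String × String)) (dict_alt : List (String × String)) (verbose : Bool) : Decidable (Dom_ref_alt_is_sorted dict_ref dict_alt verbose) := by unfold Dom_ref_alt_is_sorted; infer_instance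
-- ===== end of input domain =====

-- B replaces A's two index-based adjacent-pair scans by comparing each items list with its sorted copy (both flags computed, then combined); same return value, no speed claim.


-- ===== PORT A =====
-- Python's tuple comparison 'a > b' on pairs of strings: lexicographic (Prod.Lex order)
def pvPairGt (a b : String × String) : Bool := decide (toLex b < toLex a)

def ref_alt_is_sorted (dict_ref : List (String × String)) (dict_alt : List (String × String)) (verbose : Bool) : Bool :=
  let is_sorted := true
  let ref_list := dict_ref
  let alt_list := dict_alt
  let is_sorted := (PySem.List.pyRange 0 ((ref_list.length : Int) - 1) 1).foldl
    (fun acc i =>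
      if pvPairGt (PySem.List.pyGetD ref_list i ("", "")) (PySem.List.pyGetD ref_list (i + 1) ("", "")) then false else acc)
    is_sorted
  let is_sorted := (PySem.List.pyRange 0 ((alt_list.length : Int) - 1) 1).foldl
    (fun acc j =>
      if pvPairGt (PySem.List.pyGetD alt_list j ("", "")) (PySem.List.pyGetD alt_list (j + 1) ("", "")) then false else acc)
    is_sorted
  is_sorted

-- ===== PORT B =====
def ref_alt_is_sorted_alt (dict_ref : List (String × String)) (dict_alt : List (String × String)) (verbose : Bool) : Bool :=
  let ref_list := dict_ref
  let alt_list := dict_alt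
  let ref_ok := decide (ref_list = PySem.List.sorted ref_list (fun p => toLex p))
  let alt_ok := decide (alt_list = PySem.List.sorted alt_list (fun p => toLex p))
  ref_ok && alt_ok

-- ===== PRECONDITION & SPEC =====
def Spec_ref_alt_is_sorted (dict_ref : List (String × String)) (dict_alt : List (String × String)) (verbose : Bool) (out : Bool) : Prop := out = ref_alt_is_sorted_alt dict_ref dict_alt verbose
instance (dict_ref : List (String × String)) (dict_alt : List (String × String)) (verbose : Bool) (out : Bool) : Decidable (Spec_ref_alt_is_sorted dict_ref dict_alt verbose out) := by unfold Spec_ref_alt_is_sorted; infer_instance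

-- ===== CLAIM (what is proved, stated in full; the proofs are below) =====
def Claim_equal_ref_alt_is_sorted : Prop := ∀ (dict_ref : List (String × String)) (dict_alt : List (String × String)) (verbose : Bool), Dom_ref_alt_is_sorted dict_ref dict_alt verbose → Spec_ref_alt_is_sorted dict_ref dict_alt verbose (ref_alt_is_sorted dict_ref dict_alt verbose)

-- ===== LEMMAS AND PROOFS =====
-- A's loop shape: a flag that is set to False on any hit equals 'initial flag && no hit'.
theorem pvFoldlFlag (P : Int → Bool) (l : List Int) (b : Bool) :
    l.foldl (fun acc i => if P i then false else acc) b = (b && l.all (fun i => !P i)) := by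
  induction l generalizing b with
  | nil => simp
  | cons a t ih =>
    rw [List.foldl_cons, ih]
    cases h : P a <;> simp [h]

-- one adjacent scan, as a Pairwise statement
theorem pvScanEq (l : List (String × String)) :
    ((PySem.List.pyRange 0 ((l.length : Int) - 1) 1).all
      (fun i => !pvPairGt (PySem.List.pyGetD l i ("", "")) (PySem.List.pyGetD l (i + 1) ("", ""))))
    = decide (l.Pairwise (fun a b => toLex a ≤ toLex b)) := by
  haveI : IsTrans (String × String) (fun a b => toLex a ≤ toLex b) := ⟨fun _ _ _ => le_trans⟩
  apply Bool.eq_iff_iff.mpr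
  rw [List.all_eq_true, decide_eq_true_eq, ← List.isChain_iff_pairwise, List.isChain_iff_getElem]
  constructor
  · intro h i hi
    have hm : (i : Int) ∈ PySem.List.pyRange 0 ((l.length : Int) - 1) 1 := by
      rw [PySem.List.mem_pyRange_one]; omega
    have := h _ hm
    rw [PySem.List.pyGetD_eq_getElem l ("", "") (by omega) (by omega),
        PySem.List.pyGetD_eq_getElem l ("", "") (by omega) (by omega)] at this
    simp only [pvPairGt, Bool.not_eq_eq_eq_not, Bool.not_true, decide_eq_false_iff_not, not_lt] at this
    have hk : ((i : Int)).toNat = i := by omega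
    have hk1 : ((i : Int) + 1).toNat = i + 1 := by omega
    simpa [hk, hk1] using this
  · intro h i hm
    rw [PySem.List.mem_pyRange_one] at hm
    have hlt : i.toNat + 1 < l.length := by omega
    rw [PySem.List.pyGetD_eq_getElem l ("", "") (by omega) (by omega),
        PySem.List.pyGetD_eq_getElem l ("", "") (by omega) (by omega)]
    have hk1 : (i + 1).toNat = i.toNat + 1 := by omega
    have := h i.toNat hlt
    simp only [pvPairGt, hk1, Bool.not_eq_eq_eq_not, Bool.not_true, decide_eq_false_iff_not, not_lt]
    exact this

-- B's comparison with the sorted copy, as the same Pairwise statement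
theorem pvEqSortedIff (l : List (String × String)) :
    (l = PySem.List.sorted l (fun p => toLex p)) ↔ l.Pairwise (fun a b => toLex a ≤ toLex b) := by
  constructor
  · intro h
    have := PySem.List.sorted_pairwise l (fun p => toLex p)
    rwa [← h] at this
  · intro h
    exact (PySem.List.sorted_eq_self_of_pairwise l _ h).symm

-- ===== VERDICT (by name: the statement is the Claim_ definition above) =====
theorem ref_alt_is_sorted_spec : Claim_equal_ref_alt_is_sorted := by
  intro dict_ref dict_alt verbose _
  show _ = _
  unfold ref_alt_is_sorted ref_alt_is_sorted_alt
  simp only []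
  rw [pvFoldlFlag, pvFoldlFlag, pvScanEq, pvScanEq, Bool.true_and]
  apply Bool.eq_iff_iff.mpr
  simp only [Bool.and_eq_true, decide_eq_true_eq]
  rw [pvEqSortedIff, pvEqSortedIff]
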